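-- pv_equiv track=rewrite | github.com/pypi-data/pypi-mirror-65 | packages/foliantcontrib.meta/foliantcontrib.meta-1.3.2-py3-none-any.whl/foliant/meta/tools.py | convert_to_id
-- ===== SOURCE A (Python) =====
-- def convert_to_id(title: str, existing_ids: list) -> str:
--     '''
--     (based on convert_to_anchor function from apilinks preprocessor)
--     Convert heading into id. Guaranteed to be unique among `existing_ids`.
--
--     >>> convert_to_id('GET /endpoint/method{id}')
--     'get-endpoint-method-id'
--     '''
--
--     id_ = ''
--     accum = False
--     for char in title:
--         if char == '_' or char.isalnum():
--             if accum:
--                 accum = False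
--                 id_ += f'-{char.lower()}'
--             else:
--                 id_ += char.lower()
--         else:
--             accum = True
--     id_ = id_.strip(' -')
--
--     counter = 1
--     result = id_
--     while result in existing_ids:
--         counter += 1
--         result = '-'.join([id_, str(counter)])
--     existing_ids.append(result)
--     return result
-- ===== SOURCE B (Python) =====
-- def convert_to_id(title: str, existing_ids: list) -> str:
--     '''Convert heading into id, unique among `existing_ids` (which is appended to).'''
--     tokens = []
--     cur = ''
--     for ch in title:
--         if ch == '_' or ch.isalnum():
--             cur += ch.lower()
--         else:
--             if cur:
--                 tokens.append(cur)
--             cur = ''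
--     if cur:
--         tokens.append(cur)
--     id_ = '-'.join(tokens)
--
--     existing = set(existing_ids)
--     if id_ not in existing:
--         result = id_
--     else:
--         n = 2
--         while f'{id_}-{n}' in existing:
--             n += 1
--         result = f'{id_}-{n}'
--     existing_ids.append(result)
--     return result
-- ===== Notes on version B (the rewrite author's own statement) =====
-- stated objective: alternative
-- what changed: B builds the slug by collecting maximal runs of valid characters into tokens and joining them with '-' (no accumulator flag, no strip), and resolves uniqueness by a set-membership search for the first free '<id>-<n>' suffix instead of A's rebuild-and-rescan while loop over the list.
import Mathlib
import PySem

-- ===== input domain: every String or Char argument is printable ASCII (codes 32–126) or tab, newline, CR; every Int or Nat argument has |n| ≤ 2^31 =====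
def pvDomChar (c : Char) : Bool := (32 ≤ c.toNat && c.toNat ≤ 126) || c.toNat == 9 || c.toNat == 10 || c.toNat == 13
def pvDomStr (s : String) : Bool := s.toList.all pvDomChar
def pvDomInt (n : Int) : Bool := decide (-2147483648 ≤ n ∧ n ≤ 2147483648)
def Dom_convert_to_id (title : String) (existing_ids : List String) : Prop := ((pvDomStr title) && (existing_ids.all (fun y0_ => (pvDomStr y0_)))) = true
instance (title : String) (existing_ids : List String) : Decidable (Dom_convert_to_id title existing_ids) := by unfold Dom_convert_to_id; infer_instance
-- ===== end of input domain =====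

-- B rebuilds the slug from maximal runs of valid characters joined by '-' and finds the unique
-- id by a set-membership search; equivalence is about the RETURN value only (both Pythons also
-- append the result to `existing_ids`).

-- ===== PORT A =====
-- `char == '_' or char.isalnum()` (the identical test both Pythons perform on each character)
def pvValid (c : Char) : Bool := c == '_' || PySem.Chars.isalnum c

-- body of A's `for char in title` loop; state = (id_, accum)
def pvAStep (s : List Char × Bool) (c : Char) : List Char × Bool :=
  if pvValid c then
    (if s.2 then (s.1 ++ ['-', PySem.Chars.lowerChar c], false)
     else (s.1 ++ [PySem.Chars.lowerChar c], false))
  else (s.1, true)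

-- A's `'-'.join([id_, str(counter)])`
def pvCandA (id_ : String) (n : Int) : String := PySem.Str.join "-" [id_, PySem.Int.toStr n]

-- A's `while result in existing_ids` loop; fuel `existing_ids.length + 1` always suffices
-- (the successive candidates are pairwise distinct strings)
def pvALoop (id_ : String) (ex : List String) (counter : Int) (result : String) : Nat → String
  | 0 => result
  | fuel + 1 =>
      if result ∈ ex then pvALoop id_ ex (counter + 1) (pvCandA id_ (counter + 1)) fuel
      else result

def convert_to_id (title : String) (existing_ids : List String) : String :=
  let st := title.toList.foldl pvAStep ([], false)
  let id_ := PySem.Str.stripChars (String.ofList st.1) " -"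
  pvALoop id_ existing_ids 1 id_ (existing_ids.length + 1)

-- ===== PORT B =====
-- body of B's token-collecting loop; state = (tokens, cur)
def pvBStep (s : List String × List Char) (c : Char) : List String × List Char :=
  if pvValid c then (s.1, s.2 ++ [PySem.Chars.lowerChar c])
  else if s.2.isEmpty then (s.1, []) else (s.1 ++ [String.ofList s.2], [])

-- B's trailing `if cur: tokens.append(cur)`
def pvFlush (s : List String × List Char) : List String :=
  if s.2.isEmpty then s.1 else s.1 ++ [String.ofList s.2]

-- B's f'{id_}-{n}'
def pvCandB (id_ : String) (n : Int) : String :=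
  String.ofList (id_.toList ++ '-' :: (PySem.Int.toStr n).toList)

-- B's `while f'{id_}-{n}' in existing: n += 1` followed by the final candidate; fuel
-- `existing_ids.length` always suffices (candidates are pairwise distinct)
def pvBSearch (id_ : String) (ex : PySem.Set String) (n : Int) : Nat → String
  | 0 => pvCandB id_ n
  | fuel + 1 =>
      if PySem.Set.contains ex (pvCandB id_ n) then pvBSearch id_ ex (n + 1) fuel
      else pvCandB id_ n

def convert_to_id_alt (title : String) (existing_ids : List String) : String :=
  let toks := pvFlush (title.toList.foldl pvBStep ([], []))
  let id_ := PySem.Str.join "-" toks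
  let ex := PySem.Set.ofList existing_ids
  if PySem.Set.contains ex id_ then pvBSearch id_ ex 2 existing_ids.length else id_

-- ===== PRECONDITION & SPEC =====
def Spec_convert_to_id (title : String) (existing_ids : List String) (out : String) : Prop := out = convert_to_id_alt title existing_ids
instance (title : String) (existing_ids : List String) (out : String) : Decidable (Spec_convert_to_id title existing_ids out) := by unfold Spec_convert_to_id; infer_instance

-- ===== CLAIM (what is proved, stated in full; the proofs are below) =====
def Claim_equal_convert_to_id : Prop := ∀ (title : String) (existing_ids : List String), Dom_convert_to_id title existing_ids → Spec_convert_to_id title existing_ids (convert_to_id title existing_ids)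

-- ===== LEMMAS AND PROOFS =====

-- rest-of-input production of A's character loop, given the pending `accum` flag
def pvSlugA : List Char → Bool → List Char
  | [], _ => []
  | c :: cs, b =>
      if pvValid c then
        (if b then '-' :: PySem.Chars.lowerChar c :: pvSlugA cs false
         else PySem.Chars.lowerChar c :: pvSlugA cs false)
      else pvSlugA cs true

-- rest-of-input tokens of B's loop, given the pending buffer `cur`
def pvToks : List Char → List Char → List String
  | [], cur => if cur.isEmpty then [] else [String.ofList cur]
  | c :: cs, cur =>
      if pvValid c then pvToks cs (cur ++ [PySem.Chars.lowerChar c])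
      else (if cur.isEmpty then [] else [String.ofList cur]) ++ pvToks cs []

def pvJ (ts : List String) : List Char := PySem.Chars.join ['-'] (ts.map String.toList)

def pvGood (x : Char) : Prop := x ≠ ' ' ∧ x ≠ '-'

def pvHeadGood (s : List Char) : Prop := ∀ a, s.head? = some a → pvGood a

theorem pvFoldA (l : List Char) : ∀ acc b,
    (l.foldl pvAStep (acc, b)).1 = acc ++ pvSlugA l b := by
  induction l with
  | nil => intro acc b; simp [pvSlugA]
  | cons c cs ih =>
      intro acc b
      by_cases hv : pvValid c
      · cases b <;> simp [pvAStep, pvSlugA, hv, ih]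
      · simp [pvAStep, pvSlugA, hv, ih]

theorem pvFoldB (l : List Char) : ∀ toks cur,
    pvFlush (l.foldl pvBStep (toks, cur)) = toks ++ pvToks l cur := by
  induction l with
  | nil => intro toks cur; by_cases h : cur.isEmpty <;> simp [pvFlush, pvToks, h]
  | cons c cs ih =>
      intro toks cur
      by_cases hv : pvValid c
      · simp [pvBStep, pvToks, hv, ih]
      · by_cases h : cur.isEmpty <;> simp [pvBStep, pvToks, hv, h, ih]

theorem pvJ_nil : pvJ [] = [] := by simp [pvJ, PySem.Chars.join_nil]

theorem pvJ_single (t : String) : pvJ [t] = t.toList := by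
  simp [pvJ, PySem.Chars.join_singleton]

theorem pvJ_cons (t : String) (ts : List String) (h : ts ≠ []) :
    pvJ (t :: ts) = t.toList ++ '-' :: pvJ ts := by
  cases ts with
  | nil => exact absurd rfl h
  | cons u us => simp [pvJ, PySem.Chars.join_cons_cons]

-- main slug correspondence: A's production vs B's tokens, relative to the pending state
theorem pvML (l : List Char) :
    (∀ cur : List Char, cur ≠ [] → pvJ (pvToks l cur) = cur ++ pvSlugA l false)
    ∧ pvSlugA l true = (if pvToks l [] = [] then [] else '-' :: pvJ (pvToks l [])) := by
  induction l with
  | nil =>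
      refine ⟨fun cur hc => ?_, by simp [pvSlugA, pvToks]⟩
      simp [pvToks, pvSlugA, List.isEmpty_iff, hc, pvJ_single]
  | cons c cs ih =>
      by_cases hv : pvValid c
      · have key : ∀ cur : List Char, cur ≠ [] →
            pvJ (pvToks (c :: cs) cur) = cur ++ pvSlugA (c :: cs) false := by
          intro cur hc
          have h1 := ih.1 (cur ++ [PySem.Chars.lowerChar c]) (by simp)
          simp [pvToks, pvSlugA, hv, h1]
        refine ⟨key, ?_⟩
        have h1 := ih.1 [PySem.Chars.lowerChar c] (by simp)
        have hne : pvToks cs [PySem.Chars.lowerChar c] ≠ [] := by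
          intro h0
          rw [h0, pvJ_nil] at h1
          exact (List.cons_ne_nil _ _) h1.symm
        simp [pvToks, pvSlugA, hv, hne, h1]
      · have key : ∀ cur : List Char, cur ≠ [] →
            pvJ (pvToks (c :: cs) cur) = cur ++ pvSlugA (c :: cs) false := by
          intro cur hc
          have hce : ¬ cur.isEmpty = true := by simp [List.isEmpty_iff, hc]
          by_cases h0 : pvToks cs [] = []
          · simp [pvToks, pvSlugA, hv, hce, h0, pvJ_single, ih.2]
          · rw [show pvToks (c :: cs) cur = String.ofList cur :: pvToks cs [] from by
                  simp [pvToks, hv, hce],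
                pvJ_cons _ _ h0]
            simp [pvSlugA, hv, ih.2, h0]
        refine ⟨key, ?_⟩
        have h2 := ih.2
        simp [pvToks, pvSlugA, hv, h2]

theorem pvSL (l : List Char) :
    pvSlugA l false = pvJ (pvToks l [])
    ∨ (pvToks l [] ≠ [] ∧ pvSlugA l false = '-' :: pvJ (pvToks l [])) := by
  cases l with
  | nil => left; simp [pvSlugA, pvToks, pvJ_nil]
  | cons c cs =>
      by_cases hv : pvValid c
      · left
        have h1 := (pvML cs).1 [PySem.Chars.lowerChar c] (by simp)
        simp [pvSlugA, pvToks, hv, h1]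
      · have h2 := (pvML cs).2
        by_cases h0 : pvToks cs [] = []
        · left; simp [pvSlugA, pvToks, hv, h0, h2, pvJ_nil]
        · right
          constructor
          · simp [pvToks, hv, h0]
          · simp [pvSlugA, pvToks, hv, h0, h2]

-- a valid character, lowercased, is neither ' ' nor '-'
theorem pvGood_lower (c : Char) (h : pvValid c = true) : pvGood (PySem.Chars.lowerChar c) := by
  have key : (PySem.Chars.lowerChar c).toNat ≠ 32 ∧ (PySem.Chars.lowerChar c).toNat ≠ 45 := by
    unfold PySem.Chars.lowerChar
    by_cases hu : PySem.Chars.isupper c = true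
    · rw [if_pos hu]
      simp only [PySem.Chars.isupper, Bool.and_eq_true, decide_eq_true_eq] at hu
      have h1 : 65 ≤ c.toNat := Nat.succ_le_of_lt hu.1
      have h2 : c.toNat ≤ 90 := Fin.mk_le_mk.mp hu.2
      rw [Char.toNat_ofNat, if_pos (by simp [Nat.isValidChar]; omega)]
      omega
    · rw [if_neg hu]
      simp only [pvValid, PySem.Chars.isalnum, PySem.Chars.isalpha, Bool.or_eq_true,
        beq_iff_eq] at h
      rcases h with h | (h | h) | h
      · subst h; decide
      · exact absurd h hu
      · simp only [PySem.Chars.islower, Bool.and_eq_true, decide_eq_true_eq] at h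
        have h1 : 97 ≤ c.toNat := Nat.succ_le_of_lt h.1
        have h2 : c.toNat ≤ 122 := Fin.mk_le_mk.mp h.2
        omega
      · simp only [PySem.Chars.isdigit, Bool.and_eq_true, decide_eq_true_eq] at h
        have h1 : 48 ≤ c.toNat := Nat.succ_le_of_lt h.1
        have h2 : c.toNat ≤ 57 := Fin.mk_le_mk.mp h.2
        omega
  refine ⟨fun he => key.1 ?_, fun he => key.2 ?_⟩ <;> rw [he] <;> rfl

theorem pvToksGood (l : List Char) : ∀ cur, (∀ x ∈ cur, pvGood x) →
    ∀ t ∈ pvToks l cur, t.toList ≠ [] ∧ ∀ x ∈ t.toList, pvGood x := by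
  induction l with
  | nil =>
      intro cur hcur t ht
      by_cases h : cur.isEmpty
      · simp [pvToks, h] at ht
      · simp [pvToks, h] at ht
        subst ht
        exact ⟨by simpa [List.isEmpty_iff] using h, by simpa using hcur⟩
  | cons c cs ih =>
      intro cur hcur t ht
      by_cases hv : pvValid c
      · refine ih (cur ++ [PySem.Chars.lowerChar c]) ?_ t (by simpa [pvToks, hv] using ht)
        intro x hx
        rcases List.mem_append.mp hx with hx | hx
        · exact hcur x hx
        · simp at hx; subst hx; exact pvGood_lower c hv
      · rw [pvToks, if_neg hv] at ht
        rcases List.mem_append.mp ht with ht | ht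
        · by_cases h : cur.isEmpty
          · simp [h] at ht
          · simp [h] at ht
            subst ht
            exact ⟨by simpa [List.isEmpty_iff] using h, by simpa using hcur⟩
        · exact ih [] (by simp) t ht

theorem pvHeadGood_rev_of_all (s : List Char) (h : ∀ x ∈ s, pvGood x) :
    pvHeadGood s.reverse := by
  intro a ha
  exact h a (by simpa using List.mem_of_mem_head? ha)

theorem pvJGood (ts : List String)
    (h : ∀ t ∈ ts, t.toList ≠ [] ∧ ∀ x ∈ t.toList, pvGood x) :
    pvHeadGood (pvJ ts) ∧ pvHeadGood (pvJ ts).reverse ∧ (ts ≠ [] → pvJ ts ≠ []) := by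
  induction ts with
  | nil =>
      rw [pvJ_nil]
      exact ⟨fun a ha => by simp at ha, fun a ha => by simp at ha, fun h0 => absurd rfl h0⟩
  | cons t ts ih =>
      have ht := h t List.mem_cons_self
      have hrest : ∀ u ∈ ts, u.toList ≠ [] ∧ ∀ x ∈ u.toList, pvGood x :=
        fun u hu => h u (List.mem_cons_of_mem _ hu)
      have ih' := ih hrest
      by_cases h0 : ts = []
      · subst h0
        rw [pvJ_single]
        exact ⟨fun a ha => ht.2 a (List.mem_of_mem_head? ha),
               pvHeadGood_rev_of_all _ ht.2, fun _ => ht.1⟩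
      · rw [pvJ_cons _ _ h0]
        have hJne : pvJ ts ≠ [] := ih'.2.2 h0
        obtain ⟨b, r, hbr⟩ := List.exists_cons_of_ne_nil ht.1
        refine ⟨?_, ?_, fun _ => by simp⟩
        · intro a ha
          rw [hbr, List.cons_append, List.head?_cons] at ha
          have hab : a = b := by simpa using ha.symm
          subst hab
          exact ht.2 a (by rw [hbr]; exact List.mem_cons_self)
        · intro a ha
          rw [List.reverse_append, List.reverse_cons] at ha
          obtain ⟨b', r', hbr'⟩ :=
            List.exists_cons_of_ne_nil (show (pvJ ts).reverse ≠ [] by simpa using hJne)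
          have hg : pvGood b' := ih'.2.1 b' (by rw [hbr', List.head?_cons])
          rw [hbr'] at ha
          simp only [List.cons_append, List.append_assoc, List.head?_cons] at ha
          exact (Option.some.inj ha) ▸ hg

theorem pvStrip_eq (s : List Char) (h1 : pvHeadGood s) (h2 : pvHeadGood s.reverse) :
    PySem.Chars.stripChars s " -".toList = s := by
  show (List.dropWhile (fun c => " -".toList.contains c)
      (List.dropWhile (fun c => " -".toList.contains c) s).reverse).reverse = s
  have d1 : List.dropWhile (fun c => " -".toList.contains c) s = s := by
    cases hs : s with
    | nil => simp
    | cons a r =>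
        rw [List.dropWhile_cons, if_neg (by
          have hg := h1 a (by rw [hs]; rfl)
          simp
          exact ⟨hg.1, hg.2⟩)]
  rw [d1]
  have d2 : List.dropWhile (fun c => " -".toList.contains c) s.reverse = s.reverse := by
    cases hs : s.reverse with
    | nil => simp
    | cons a r =>
        rw [List.dropWhile_cons, if_neg (by
          have hg := h2 a (by rw [hs]; rfl)
          simp
          exact ⟨hg.1, hg.2⟩)]
  rw [d2, List.reverse_reverse]

theorem pvStrip_dash (s : List Char) (h1 : pvHeadGood s)
    (h2 : pvHeadGood s.reverse) :
    PySem.Chars.stripChars ('-' :: s) " -".toList = s := by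
  show (List.dropWhile (fun c => " -".toList.contains c)
      (List.dropWhile (fun c => " -".toList.contains c) ('-' :: s)).reverse).reverse = s
  have d1 : List.dropWhile (fun c => " -".toList.contains c) ('-' :: s) = s := by
    rw [List.dropWhile_cons, if_pos (by decide)]
    cases hs : s with
    | nil => simp
    | cons a r =>
        rw [List.dropWhile_cons, if_neg (by
          have hg := h1 a (by rw [hs]; rfl)
          simp
          exact ⟨hg.1, hg.2⟩)]
  rw [d1]
  have d2 : List.dropWhile (fun c => " -".toList.contains c) s.reverse = s.reverse := by
    cases hs : s.reverse with
    | nil => simp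
    | cons a r =>
        rw [List.dropWhile_cons, if_neg (by
          have hg := h2 a (by rw [hs]; rfl)
          simp
          exact ⟨hg.1, hg.2⟩)]
  rw [d2, List.reverse_reverse]

-- the slug built by A (after strip) is B's joined token list
theorem pvSlugEq (l : List Char) :
    PySem.Chars.stripChars (pvSlugA l false) " -".toList = pvJ (pvToks l []) := by
  have hgood := pvToksGood l [] (by simp)
  have hJ := pvJGood (pvToks l []) hgood
  rcases pvSL l with h | ⟨-, h⟩
  · rw [h]; exact pvStrip_eq _ hJ.1 hJ.2.1
  · rw [h]; exact pvStrip_dash _ hJ.1 hJ.2.1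

theorem pvCandEq (id_ : String) (n : Int) : pvCandA id_ n = pvCandB id_ n := by
  simp [pvCandA, pvCandB, PySem.Str.join, PySem.Chars.join, List.intercalate]

theorem pvContains_ofList (ex : List String) (x : String) :
    PySem.Set.contains (PySem.Set.ofList ex) x = decide (x ∈ ex) := by
  simp only [PySem.Set.contains]
  simp [PySem.Set.mem_ofList]

theorem pvLoopEq (id_ : String) (ex : List String) :
    ∀ (fuel : Nat) (n : Int),
      pvALoop id_ ex n (pvCandA id_ n) fuel = pvBSearch id_ (PySem.Set.ofList ex) n fuel := by
  intro fuel
  induction fuel with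
  | zero => intro n; simp [pvALoop, pvBSearch, pvCandEq]
  | succ f ih =>
      intro n
      rw [pvALoop, pvBSearch, pvContains_ofList, pvCandEq]
      by_cases h : pvCandB id_ n ∈ ex
      · simp only [h, decide_true, if_true]
        exact ih (n + 1)
      · simp [h]

-- ===== VERDICT (by name: the statement is the Claim_ definition above) =====
theorem convert_to_id_spec : Claim_equal_convert_to_id := by
  intro title existing_ids _
  unfold Spec_convert_to_id
  simp only [convert_to_id, convert_to_id_alt]
  have hA := pvFoldA title.toList [] false
  have hB := pvFoldB title.toList [] []
  rw [List.nil_append] at hA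
  rw [List.nil_append] at hB
  rw [hA, hB]
  have hid : PySem.Str.stripChars (String.ofList (pvSlugA title.toList false)) " -"
      = PySem.Str.join "-" (pvToks title.toList []) := by
    have h1 : (PySem.Str.stripChars (String.ofList (pvSlugA title.toList false)) " -").toList
        = (PySem.Str.join "-" (pvToks title.toList [])).toList := by
      rw [PySem.Str.toList_stripChars, PySem.Str.toList_join]
      simp only [String.toList_ofList]
      exact pvSlugEq title.toList
    calc PySem.Str.stripChars (String.ofList (pvSlugA title.toList false)) " -"
        = String.ofList (PySem.Str.stripChars (String.ofList (pvSlugA title.toList false)) " -").toList := by simp only [String.ofList_toList]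
      _ = String.ofList (PySem.Str.join "-" (pvToks title.toList [])).toList := by rw [h1]
      _ = PySem.Str.join "-" (pvToks title.toList []) := by simp only [String.ofList_toList]
  rw [hid]
  set id_ := PySem.Str.join "-" (pvToks title.toList []) with hdef
  rw [pvALoop, pvContains_ofList]
  by_cases h : id_ ∈ existing_ids
  · simp only [h, decide_true, if_true]
    exact pvLoopEq id_ existing_ids existing_ids.length 2
  · simp [h]
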